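-- pv_equiv track=rewrite | github.com/krishcdbry/nexadb | toon_format.py | _parse_csv_row
-- ===== SOURCE A (Python) =====
-- from typing import Any, Dict, List, Union
--
-- def _parse_csv_row(row_str: str) -> List[str]:
--     """Parse CSV row, handling quoted strings"""
--     # Simple CSV parsing (can be enhanced with proper CSV parser if needed)
--     values = []
--     current = ""
--     in_quotes = False
--
--     for char in row_str:
--         if char == '"':
--             in_quotes = not in_quotes
--         elif char == ',' and not in_quotes:
--             values.append(current.strip())
--             current = ""
--         else:
--             current += char
--
--     if current:
--         values.append(current.strip())
--
--     return values
-- ===== SOURCE B (Python) =====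
-- from typing import List
--
-- def _parse_csv_row(row_str: str) -> List[str]:
--     """Parse CSV row, handling quoted strings (quote-token decomposition)."""
--     parts = row_str.split('"')
--     values = []
--     current = ""
--     for i, part in enumerate(parts):
--         if i % 2 == 1:
--             # inside quotes: commas are literal
--             current += part
--         else:
--             subs = part.split(',')
--             current += subs[0]
--             for sub in subs[1:]:
--                 values.append(current.strip())
--                 current = sub
--     if current:
--         values.append(current.strip())
--     return values
-- ===== Notes on version B (the rewrite author's own statement) =====
-- stated objective: idiomatic
-- what changed: Replaces A's char-by-char in_quotes state machine with a decomposition that splits the row on the quote character (odd tokens are inside quotes, taken verbatim; even tokens are comma-split), keeping the same emit/strip/trailing-field behaviour.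
import Mathlib
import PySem

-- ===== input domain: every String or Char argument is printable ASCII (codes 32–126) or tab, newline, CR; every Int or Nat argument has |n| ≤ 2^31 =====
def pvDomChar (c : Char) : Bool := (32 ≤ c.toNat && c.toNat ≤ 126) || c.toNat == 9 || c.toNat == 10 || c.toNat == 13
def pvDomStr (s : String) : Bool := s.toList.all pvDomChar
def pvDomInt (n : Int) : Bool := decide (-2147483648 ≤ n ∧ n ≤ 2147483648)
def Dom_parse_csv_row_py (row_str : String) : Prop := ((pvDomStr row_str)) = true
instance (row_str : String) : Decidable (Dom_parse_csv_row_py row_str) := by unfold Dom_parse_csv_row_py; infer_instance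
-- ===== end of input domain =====

-- B replaces A's char-by-char quote-state machine by a quote-token decomposition
-- (split on '"', comma-split the even tokens only); objective: idiomatic/alternative.

-- ===== PORT A =====
-- one loop iteration of A over a character; state = (values, current, in_quotes)
def pvAStep (st : List String × List Char × Bool) (c : Char) : List String × List Char × Bool :=
  if c = '"' then (st.1, st.2.1, !st.2.2)
  else if c = ',' ∧ st.2.2 = false then
    (st.1 ++ [String.ofList (PySem.Chars.strip st.2.1)], [], st.2.2)
  else (st.1, st.2.1 ++ [c], st.2.2)

def parse_csv_row_py (row_str : String) : List String :=
  let st := row_str.toList.foldl pvAStep ([], [], false)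
  if st.2.1 ≠ [] then st.1 ++ [String.ofList (PySem.Chars.strip st.2.1)] else st.1

-- ===== PORT B =====
-- the inner loop 'for sub in subs[1:]': emit current.strip(), restart current at sub
def pvBSubsTail : List (List Char) → List String → List Char → List String × List Char
  | [], vs, cur => (vs, cur)
  | s :: rest, vs, cur => pvBSubsTail rest (vs ++ [String.ofList (PySem.Chars.strip cur)]) s

-- the outer loop over the quote-delimited parts; `inside` is the quote parity (i % 2 == 1)
def pvBParts : List (List Char) → Bool → List String → List Char → List String × List Char
  | [], _, vs, cur => (vs, cur)
  | p :: ps, inside, vs, cur =>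
    if inside then pvBParts ps (!inside) vs (cur ++ p)
    else
      match p.splitOn ',' with
      | [] => pvBParts ps (!inside) vs cur  -- unreachable: splitOn is never empty
      | s₀ :: rest =>
        let r := pvBSubsTail rest vs (cur ++ s₀)
        pvBParts ps (!inside) r.1 r.2

def parse_csv_row_py_alt (row_str : String) : List String :=
  let r := pvBParts (row_str.toList.splitOn '"') false [] []
  if r.2 ≠ [] then r.1 ++ [String.ofList (PySem.Chars.strip r.2)] else r.1

-- ===== PRECONDITION & SPEC =====
def Spec_parse_csv_row_py (row_str : String) (out : List String) : Prop := out = parse_csv_row_py_alt row_str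
instance (row_str : String) (out : List String) : Decidable (Spec_parse_csv_row_py row_str out) := by unfold Spec_parse_csv_row_py; infer_instance

-- ===== CLAIM (what is proved, stated in full; the proofs are below) =====
def Claim_equal_parse_csv_row_py : Prop := ∀ (row_str : String), Dom_parse_csv_row_py row_str → Spec_parse_csv_row_py row_str (parse_csv_row_py row_str)

-- ===== LEMMAS AND PROOFS =====

-- A's loop over the characters equals B's loop over the quote-split tokens
theorem pv_main (chars : List Char) : ∀ (q : Bool) (vs : List String) (cur : List Char),
    ((chars.foldl pvAStep (vs, cur, q)).1, (chars.foldl pvAStep (vs, cur, q)).2.1)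
      = pvBParts (chars.splitOn '"') q vs cur := by
  induction chars with
  | nil =>
    intro q vs cur
    simp only [List.foldl_nil, List.splitOn_nil]
    cases q <;> simp [pvBParts, pvBSubsTail, List.splitOn_nil]
  | cons c cs ih =>
    intro q vs cur
    by_cases hc : c = '"'
    · subst hc
      have hsplit : ('"' :: cs).splitOn '"' = [] :: cs.splitOn '"' := by
        simp [List.splitOn, List.splitOnP_cons]
      rw [hsplit]
      have hstep : pvAStep (vs, cur, q) '"' = (vs, cur, !q) := by simp [pvAStep]
      rw [List.foldl_cons, hstep]
      cases q
      · simpa [pvBParts, pvBSubsTail, List.splitOn_nil] using ih (!false) vs cur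
      · simpa [pvBParts] using ih (!true) vs cur
    · obtain ⟨p, ps, hps⟩ : ∃ p ps, cs.splitOn '"' = p :: ps := by
        rcases h : cs.splitOn '"' with _ | ⟨p, ps⟩
        · exact absurd h (List.splitOnP_ne_nil _ _)
        · exact ⟨p, ps, rfl⟩
      have hsplit : (c :: cs).splitOn '"' = (c :: p) :: ps := by
        simp [List.splitOn, List.splitOnP_cons, hc]
        simp only [List.splitOn] at hps
        rw [hps]; rfl
      rw [hsplit]
      cases q with
      | true =>
        have hstep : pvAStep (vs, cur, true) c = (vs, cur ++ [c], true) := by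
          simp [pvAStep, hc]
        rw [List.foldl_cons, hstep]
        have := ih true vs (cur ++ [c])
        rw [hps] at this
        simp only [pvBParts, if_pos]
        rw [this]
        simp only [pvBParts, if_pos, Bool.not_true]
        simp [List.append_assoc]
      | false =>
        by_cases hcomma : c = ','
        · subst hcomma
          have hstep : pvAStep (vs, cur, false) ',' =
              (vs ++ [String.ofList (PySem.Chars.strip cur)], [], false) := by
            simp [pvAStep, hc]
          rw [List.foldl_cons, hstep]
          have := ih false (vs ++ [String.ofList (PySem.Chars.strip cur)]) []
          rw [hps] at this
          rw [this]
          -- both sides reduce to the same pvBSubsTail call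
          obtain ⟨t, ts, hts⟩ : ∃ t ts, p.splitOn ',' = t :: ts := by
            rcases h : p.splitOn ',' with _ | ⟨t, ts⟩
            · exact absurd h (List.splitOnP_ne_nil _ _)
            · exact ⟨t, ts, rfl⟩
          have hsplit2 : (',' :: p).splitOn ',' = [] :: p.splitOn ',' := by
            simp [List.splitOn, List.splitOnP_cons]
          simp only [pvBParts, if_neg (Bool.false_ne_true), hsplit2, hts, Bool.not_false]
          simp [pvBSubsTail]
        · have hstep : pvAStep (vs, cur, false) c = (vs, cur ++ [c], false) := by
            simp [pvAStep, hc, hcomma]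
          rw [List.foldl_cons, hstep]
          have := ih false vs (cur ++ [c])
          rw [hps] at this
          rw [this]
          obtain ⟨t, ts, hts⟩ : ∃ t ts, p.splitOn ',' = t :: ts := by
            rcases h : p.splitOn ',' with _ | ⟨t, ts⟩
            · exact absurd h (List.splitOnP_ne_nil _ _)
            · exact ⟨t, ts, rfl⟩
          have hsplit2 : (c :: p).splitOn ',' = (c :: t) :: ts := by
            simp [List.splitOn, List.splitOnP_cons, hcomma]
            simp only [List.splitOn] at hts
            rw [hts]; rfl
          simp only [pvBParts, if_neg (Bool.false_ne_true), hsplit2, hts, Bool.not_false]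
          simp [List.append_assoc]

-- ===== VERDICT (by name: the statement is the Claim_ definition above) =====
theorem parse_csv_row_py_spec : Claim_equal_parse_csv_row_py := by
  intro s _
  unfold Spec_parse_csv_row_py parse_csv_row_py parse_csv_row_py_alt
  have h := pv_main s.toList false [] []
  rw [← h]
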